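-- pv_equiv track=rewrite | github.com/mischaikow/advent_of_code | 2015/15_code.py | special_multiply
-- ===== SOURCE A (Python) =====
-- from typing import List
--
-- def special_multiply(values: List[int]) -> int:
--   ans = 1
--   for v in values:
--     if v > 0:
--       ans *= v
--     else:
--       return 0
--   return ans
-- ===== SOURCE B (Python) =====
-- import math
-- from typing import List
--
-- def special_multiply(values: List[int]) -> int:
--   if any(v <= 0 for v in values):
--     return 0
--   return math.prod(values)
-- ===== Notes on version B (the rewrite author's own statement) =====
-- stated objective: simpler
-- what changed: Replaced the fused accumulate-with-early-return loop by a separate any() guard for non-positive values plus a math.prod library call.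
import Mathlib
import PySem

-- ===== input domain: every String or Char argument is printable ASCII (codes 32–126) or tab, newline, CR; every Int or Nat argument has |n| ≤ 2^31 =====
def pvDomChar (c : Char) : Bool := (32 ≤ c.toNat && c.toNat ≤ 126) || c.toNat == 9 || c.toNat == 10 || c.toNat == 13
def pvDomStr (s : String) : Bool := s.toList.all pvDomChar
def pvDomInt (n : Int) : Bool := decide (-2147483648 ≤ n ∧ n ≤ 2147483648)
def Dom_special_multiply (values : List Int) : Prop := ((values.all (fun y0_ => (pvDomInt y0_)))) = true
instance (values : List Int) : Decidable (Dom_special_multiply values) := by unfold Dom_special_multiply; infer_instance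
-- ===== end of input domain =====

-- B replaces A's fused early-return product loop by an any() non-positive guard plus math.prod (objective: simpler).


-- ===== PORT A =====
def special_multiply (values : List Int) : Int :=
  -- literal port of A: ans = 1; for v: if v > 0 then ans *= v else return 0
  go values 1
where
  go : List Int → Int → Int
  | [], ans => ans
  | v :: rest, ans => if v > 0 then go rest (ans * v) else 0

-- ===== PORT B =====
-- B: guard with any(non-positive), then math.prod
def special_multiply_alt (values : List Int) : Int :=
  if values.any (fun v => v ≤ 0) then 0 else values.prod

-- ===== PRECONDITION & SPEC =====
def Spec_special_multiply (values : List Int) (out : Int) : Prop := out = special_multiply_alt values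
instance (values : List Int) (out : Int) : Decidable (Spec_special_multiply values out) := by unfold Spec_special_multiply; infer_instance

-- ===== CLAIM (what is proved, stated in full; the proofs are below) =====
def Claim_equal_special_multiply : Prop := ∀ (values : List Int), Dom_special_multiply values → Spec_special_multiply values (special_multiply values)

-- ===== LEMMAS AND PROOFS =====

theorem special_multiply_go_eq (values : List Int) (ans : Int) :
    special_multiply.go values ans =
      (if values.any (fun v => v ≤ 0) then 0 else ans * values.prod) := by
  induction values generalizing ans with
  | nil => simp [special_multiply.go]
  | cons v rest ih =>
    simp only [special_multiply.go, List.any_cons, List.prod_cons]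
    by_cases h : v > 0
    · have hv : ¬ (v ≤ 0) := by omega
      simp [h, hv, ih, mul_assoc]
    · have hv : v ≤ 0 := by omega
      simp [h, hv]

-- ===== VERDICT (by name: the statement is the Claim_ definition above) =====
theorem special_multiply_spec : Claim_equal_special_multiply := by
  intro values _
  unfold Spec_special_multiply special_multiply special_multiply_alt
  rw [special_multiply_go_eq]
  simp
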